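-- pv_equiv track=rewrite | github.com/patrykel/ztis-project | src/run_notes_tagging.py | process_words
-- ===== SOURCE A (Python) =====
-- import operator
--
-- def process_words(processed_document, dict_words, dict_currencies):
--     positive_words = 0
--     negative_words = 0
--     currencies_words = {}
--     growth = None
--     currency = None
--
--     for word in processed_document:
--         if word in dict_words:
--             if dict_words[word] is True:
--                 positive_words += 1
--             else:
--                 negative_words += 1
--
--         if word in dict_currencies:
--             if dict_currencies[word] in currencies_words:
--                 currencies_words[dict_currencies[word]] += 1
--             else:
--                 currencies_words[dict_currencies[word]] = 1
--
--     if positive_words > negative_words: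
--         growth = True
--     elif positive_words == negative_words:
--         growth = None
--     else:
--         growth = False
--
--     if bool(currencies_words):
--         sorted_currencies = sorted(currencies_words.items(), key=operator.itemgetter(1))
--         currency = sorted_currencies[-1][0]
--
--     return growth, currency
-- ===== SOURCE B (Python) =====
-- def process_words(processed_document, dict_words, dict_currencies):
--     balance = 0
--     counts = {}
--     for word in processed_document:
--         sentiment = dict_words.get(word)
--         if sentiment is not None:
--             balance += 1 if sentiment else -1
--         cur = dict_currencies.get(word)
--         if cur is not None:
--             counts[cur] = counts.get(cur, 0) + 1
--     growth = None if balance == 0 else balance > 0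
--     currency = None
--     best = 0
--     for cur, n in counts.items():
--         if n >= best:
--             best, currency = n, cur
--     return growth, currency
-- ===== Notes on version B (the rewrite author's own statement) =====
-- stated objective: simpler
-- what changed: Keeps one signed sentiment balance instead of two counters, and replaces the final sort-of-all-currency-counts-then-take-last by a single linear argmax scan (>= so ties resolve to the latest-inserted currency, like stable sort's last element).
import Mathlib
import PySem

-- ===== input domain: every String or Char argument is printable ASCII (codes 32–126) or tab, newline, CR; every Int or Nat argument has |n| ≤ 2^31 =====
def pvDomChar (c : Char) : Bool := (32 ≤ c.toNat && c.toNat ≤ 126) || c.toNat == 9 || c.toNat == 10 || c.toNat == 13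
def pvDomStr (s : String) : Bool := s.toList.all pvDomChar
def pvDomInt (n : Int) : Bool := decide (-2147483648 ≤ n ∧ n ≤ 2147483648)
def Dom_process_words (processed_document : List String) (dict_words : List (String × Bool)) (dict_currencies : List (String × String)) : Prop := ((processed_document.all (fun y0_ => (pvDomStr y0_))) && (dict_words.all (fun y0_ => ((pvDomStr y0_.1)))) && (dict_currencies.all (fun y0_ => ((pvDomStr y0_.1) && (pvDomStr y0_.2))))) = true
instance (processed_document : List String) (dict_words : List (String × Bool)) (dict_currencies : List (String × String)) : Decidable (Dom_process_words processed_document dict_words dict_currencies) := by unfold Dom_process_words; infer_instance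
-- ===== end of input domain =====

-- B keeps one signed sentiment balance instead of two counters and replaces A's
-- "sort the currency counts, take the last" by a single linear argmax scan (ties to the
-- latest-inserted currency, matching the stable sort's last element); objective: simpler.

-- ===== PORT A =====
-- body of A's "for word in processed_document" loop; state = (positive_words, negative_words, currencies_words)
def stepA (dw : PySem.Dict String Bool) (dc : PySem.Dict String String)
    (st : Int × Int × PySem.Dict String Int) (word : String) : Int × Int × PySem.Dict String Int :=
  let pos := st.1; let neg := st.2.1; let cw := st.2.2
  -- if word in dict_words: if dict_words[word] is True: pos += 1 else: neg += 1
  let pn : Int × Int :=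
    if dw.contains word then
      if dw.getD word false = true then (pos + 1, neg) else (pos, neg + 1)
    else (pos, neg)
  -- if word in dict_currencies: increment currencies_words[dict_currencies[word]]
  let cw :=
    if dc.contains word then
      let c := dc.getD word ""   -- dict_currencies[word]; guarded by contains, so exact
      if cw.contains c then cw.insert c (cw.getD c 0 + 1) else cw.insert c 1
    else cw
  (pn.1, pn.2, cw)

def process_words (processed_document : List String) (dict_words : List (String × Bool)) (dict_currencies : List (String × String)) : Option Bool × Option String :=
  let dw := PySem.Dict.mk dict_words
  let dc := PySem.Dict.mk dict_currencies
  let st := processed_document.foldl (stepA dw dc) (0, 0, PySem.Dict.empty)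
  let positive_words := st.1; let negative_words := st.2.1; let currencies_words := st.2.2
  let growth : Option Bool :=
    if positive_words > negative_words then some true
    else if positive_words = negative_words then none
    else some false
  let currency : Option String :=
    if currencies_words.size ≠ 0 then
      let sorted_currencies := PySem.List.sorted currencies_words.items (fun p => p.2) false
      match PySem.List.pyGet? sorted_currencies (-1) with
      | some p => some p.1
      | none => none   -- unreachable: the dict is nonempty
    else none
  (growth, currency)

-- ===== PORT B =====
-- body of B's loop; state = (balance, counts)
def stepB (dw : PySem.Dict String Bool) (dc : PySem.Dict String String)
    (st : Int × PySem.Dict String Int) (word : String) : Int × PySem.Dict String Int :=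
  let balance := st.1; let counts := st.2
  let balance :=
    match dw.get? word with
    | some sentiment => balance + (if sentiment then 1 else -1)
    | none => balance
  let counts :=
    match dc.get? word with
    | some cur => counts.insert cur (counts.getD cur 0 + 1)
    | none => counts
  (balance, counts)

def process_words_alt (processed_document : List String) (dict_words : List (String × Bool)) (dict_currencies : List (String × String)) : Option Bool × Option String :=
  let dw := PySem.Dict.mk dict_words
  let dc := PySem.Dict.mk dict_currencies
  let st := processed_document.foldl (stepB dw dc) (0, PySem.Dict.empty)
  let growth : Option Bool := if st.1 = 0 then none else some (decide (st.1 > 0))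
  let best := st.2.items.foldl
    (fun (bc : Int × Option String) p => if p.2 ≥ bc.1 then (p.2, some p.1) else bc)
    (0, none)
  (growth, best.2)

-- ===== PRECONDITION & SPEC =====
def Spec_process_words (processed_document : List String) (dict_words : List (String × Bool)) (dict_currencies : List (String × String)) (out : Option Bool × Option String) : Prop := out = process_words_alt processed_document dict_words dict_currencies
instance (processed_document : List String) (dict_words : List (String × Bool)) (dict_currencies : List (String × String)) (out : Option Bool × Option String) : Decidable (Spec_process_words processed_document dict_words dict_currencies out) := by unfold Spec_process_words; infer_instance

-- ===== CLAIM (what is proved, stated in full; the proofs are below) =====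
def Claim_equal_process_words : Prop := ∀ (processed_document : List String) (dict_words : List (String × Bool)) (dict_currencies : List (String × String)), Dom_process_words processed_document dict_words dict_currencies → Spec_process_words processed_document dict_words dict_currencies (process_words processed_document dict_words dict_currencies)

-- ===== LEMMAS AND PROOFS =====

-- The last element of a stable key-sort: inserting x leaves the old maximum last iff key x < key m.
theorem getLast_insertBy {α : Type} (key : α → Int) (x : α) (s : List α)
    (hs : s.Pairwise (fun a b => key a ≤ key b)) (m : α) (hm : s.getLast? = some m) :
    (PySem.List.insertBy (fun a b => decide (key a < key b)) x s).getLast?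
      = if key x < key m then some m else some x := by
  induction s with
  | nil => simp at hm
  | cons y ys ih =>
    simp only [PySem.List.insertBy]
    by_cases hxy : key x < key y
    · simp only [hxy, decide_true, if_true]
      rw [List.getLast?_cons_cons, hm]
      have hym : key y ≤ key m := by
        rcases List.mem_cons.mp (List.mem_of_getLast? hm) with h | h
        · exact le_of_eq (congrArg key h.symm)
        · exact (List.pairwise_cons.mp hs).1 m h
      rw [if_pos (lt_of_lt_of_le hxy hym)]
    · simp only [hxy, decide_false, Bool.false_eq_true, if_false]
      cases ys with
      | nil =>
        simp only [List.getLast?_singleton, Option.some.injEq] at hm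
        subst hm
        simp [PySem.List.insertBy, hxy, List.getLast?]
      | cons z zs =>
        rw [List.getLast?_cons_cons] at hm
        have hne : PySem.List.insertBy (fun a b => decide (key a < key b)) x (z :: zs) ≠ [] := by
          intro h
          have := (PySem.List.mem_insertBy (before := fun a b => decide (key a < key b))
            (x := x) (ys := z :: zs) (y := x)).mpr (Or.inl rfl)
          rw [h] at this; exact (List.not_mem_nil this)
        obtain ⟨w, ws, hw⟩ := List.exists_cons_of_ne_nil hne
        rw [hw, List.getLast?_cons_cons, ← hw, ih (List.pairwise_cons.mp hs).2 hm]

-- The argmax scan over a list of positive-valued pairs returns the last element of its stable sort.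
theorem scan_eq_sorted_last (l : List (String × Int)) (hpos : ∀ p ∈ l, 1 ≤ p.2) :
    l.foldl (fun (bc : Int × Option String) p => if p.2 ≥ bc.1 then (p.2, some p.1) else bc) (0, none)
      = match (PySem.List.sorted l (fun p => p.2) false).getLast? with
        | none => (0, none)
        | some m => (m.2, some m.1) := by
  induction l using List.reverseRecOn with
  | nil => simp [PySem.List.sorted]
  | append_singleton l x ih =>
    have hpos' : ∀ p ∈ l, 1 ≤ p.2 := fun p hp => hpos p (List.mem_append_left _ hp)
    have hx : (1 : Int) ≤ x.2 := hpos x (List.mem_append_right _ (List.mem_singleton_self x))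
    rw [List.foldl_append, ih hpos']
    have hsr : PySem.List.sorted (l ++ [x]) (fun p => p.2) false
        = PySem.List.insertBy (fun a b => decide (a.2 < b.2)) x
            (PySem.List.sorted l (fun p => p.2) false) := by
      rw [PySem.List.sorted_eq_foldl_insertBy, PySem.List.sorted_eq_foldl_insertBy,
        List.foldl_append]
      simp
    rw [hsr]
    cases hlast : (PySem.List.sorted l (fun p => p.2) false).getLast? with
    | none =>
      rw [List.getLast?_eq_none_iff.mp hlast]
      simp only [PySem.List.insertBy]
      have : x.2 ≥ (0 : Int) := by omega
      simp [this, List.getLast?]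
    | some m =>
      rw [getLast_insertBy (fun p => p.2) x _ (PySem.List.sorted_pairwise l (fun p => p.2)) m hlast]
      by_cases h : x.2 < m.2
      · rw [if_pos h]
        have : ¬ (x.2 ≥ m.2) := by omega
        simp [this]
      · rw [if_neg h]
        have : x.2 ≥ m.2 := by omega
        simp [this]

-- Values stored in the counts dict by B's loop are ≥ 1.
theorem values_pos (dw : PySem.Dict String Bool) (dc : PySem.Dict String String)
    (doc : List String) (b0 : Int) (cw : PySem.Dict String Int)
    (h : ∀ p ∈ cw.items, 1 ≤ p.2) :
    ∀ p ∈ (doc.foldl (stepB dw dc) (b0, cw)).2.items, 1 ≤ p.2 := by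
  induction doc generalizing b0 cw with
  | nil => exact h
  | cons w ws ih =>
    simp only [List.foldl_cons, stepB]
    cases hg : dc.get? w with
    | none => exact ih _ cw h
    | some c =>
      apply ih
      intro p hp
      rcases (PySem.Dict.mem_items_insert cw c (cw.getD c 0 + 1) p).mp hp with he | ⟨hmem, _⟩
      · subst he
        simp only
        cases hc : cw.get? c with
        | none => rw [PySem.Dict.getD_eq_get?_getD, hc]; simp
        | some v =>
          rw [PySem.Dict.getD_of_get?_eq_some _ _ hc]
          exact le_trans (h (c, v) (PySem.Dict.mem_items_of_get?_eq_some _ hc)) (by omega)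
      · exact h p hmem

-- A's (pos, neg, currencies) loop and B's (balance, counts) loop stay related by
-- balance = pos - neg and equal count dicts.
theorem loop_state_eq (dw : PySem.Dict String Bool) (dc : PySem.Dict String String)
    (doc : List String) (pos neg : Int) (cw : PySem.Dict String Int) :
    (doc.foldl (stepA dw dc) (pos, neg, cw)).1 - (doc.foldl (stepA dw dc) (pos, neg, cw)).2.1
        = (doc.foldl (stepB dw dc) (pos - neg, cw)).1
      ∧ (doc.foldl (stepA dw dc) (pos, neg, cw)).2.2
        = (doc.foldl (stepB dw dc) (pos - neg, cw)).2 := by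
  induction doc generalizing pos neg cw with
  | nil => simp
  | cons w ws ih =>
    simp only [List.foldl_cons, stepA, stepB]
    have hcw : (if dc.contains w then
          let c := dc.getD w ""
          if cw.contains c then cw.insert c (cw.getD c 0 + 1) else cw.insert c 1
        else cw)
        = (match dc.get? w with
          | some cur => cw.insert cur (cw.getD cur 0 + 1)
          | none => cw) := by
      rw [PySem.Dict.contains_eq_isSome_get?]
      cases hg : dc.get? w with
      | none => simp
      | some c =>
        simp only [Option.isSome_some, if_true]
        rw [PySem.Dict.getD_of_get?_eq_some _ _ hg]
        rw [PySem.Dict.contains_eq_isSome_get?]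
        cases hc : cw.get? c with
        | none =>
          rw [PySem.Dict.getD_eq_get?_getD, hc]
          simp
        | some v => simp
    have hpn : (if dw.contains w then
          if dw.getD w false = true then ((pos : Int) + 1, neg) else (pos, neg + 1)
        else (pos, neg))
        = (match dw.get? w with
          | some s => if s then (pos + 1, neg) else (pos, neg + 1)
          | none => (pos, neg)) := by
      rw [PySem.Dict.contains_eq_isSome_get?]
      cases hg : dw.get? w with
      | none => simp
      | some b =>
        rw [PySem.Dict.getD_of_get?_eq_some _ _ hg]
        cases b <;> simp
    simp only at hcw hpn ⊢
    rw [hpn, hcw]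
    cases hg : dw.get? w with
    | none =>
      simpa using ih pos neg _
    | some b =>
      cases b with
      | true =>
        have hδ : pos + 1 - neg = pos - neg + 1 := by ring
        simpa [hδ] using ih (pos + 1) neg _
      | false =>
        have hδ : pos - (neg + 1) = pos - neg + -1 := by ring
        simpa [hδ] using ih pos (neg + 1) _

-- A's three-way growth branch equals B's balance test when balance = pos - neg.
theorem growth_eq (p n b : Int) (h : p - n = b) :
    (if p > n then some true else if p = n then none else some false)
      = (if b = 0 then (none : Option Bool) else some (decide (b > 0))) := by
  by_cases hgt : p > n
  · have h0 : ¬ b = 0 := by omega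
    have h1 : b > 0 := by omega
    simp [hgt, h0, h1]
  · by_cases heq : p = n
    · have h0 : b = 0 := by omega
      simp [heq, h0]
    · have h0 : ¬ b = 0 := by omega
      have h1 : ¬ b > 0 := by omega
      simp [hgt, heq, h0, h1]

-- A's "sort the items, take the last one's key" equals B's argmax scan.
theorem currency_eq (d : PySem.Dict String Int) (hpos : ∀ p ∈ d.items, 1 ≤ p.2) :
    (if d.size ≠ 0 then
        match PySem.List.pyGet? (PySem.List.sorted d.items (fun p => p.2) false) (-1) with
        | some p => some p.1
        | none => none
      else none)
      = (d.items.foldl (fun (bc : Int × Option String) p => if p.2 ≥ bc.1 then (p.2, some p.1) else bc)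
          (0, none)).2 := by
  rw [scan_eq_sorted_last d.items hpos, PySem.List.pyGet?_neg_one]
  by_cases h : d.items = []
  · have hs : PySem.List.sorted d.items (fun p => p.2) false = [] :=
      (PySem.List.sorted_eq_nil_iff _ _ _).mpr h
    rw [hs]
    simp [PySem.Dict.size, h]
  · have hs : PySem.List.sorted d.items (fun p => p.2) false ≠ [] := by
      simpa [PySem.List.sorted_eq_nil_iff] using h
    obtain ⟨m, hm⟩ := Option.isSome_iff_exists.mp
      ((List.getLast?_isSome (l := PySem.List.sorted d.items (fun p => p.2) false)).mpr hs)
    have hsize : d.size ≠ 0 := by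
      simpa [PySem.Dict.size, List.length_eq_zero_iff] using h
    rw [hm]
    simp [hsize]

-- ===== VERDICT (by name: the statement is the Claim_ definition above) =====
theorem process_words_spec : Claim_equal_process_words := by
  intro doc dwl dcl _
  unfold Spec_process_words process_words process_words_alt
  obtain ⟨h1, h2⟩ := loop_state_eq (PySem.Dict.mk dwl) (PySem.Dict.mk dcl) doc 0 0 PySem.Dict.empty
  rw [sub_self] at h1 h2
  dsimp only
  rw [Prod.mk.injEq]
  refine ⟨growth_eq _ _ _ h1, ?_⟩
  rw [h2]
  exact currency_eq _ (values_pos _ _ doc 0 PySem.Dict.empty (by simp [PySem.Dict.empty]))
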